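-- pv_equiv track=rewrite | github.com/agh-bit-academy/SummerProject2022 | WDI/Zestaw_3/Zadanie_15/sol.py | f
-- ===== SOURCE A (Python) =====
-- def isPrime(x):
--     if x < 2:
--         return False
--     i = 2
--     while i * i <= x:
--         if x % i == 0:
--             return False
--         i += 1
--     return True
--
-- def f(array):
--     a = 1
--     b = 2
--     c = 3
--     primeNumber = False
--
--     if isPrime(array[0]):
--         return False
--
--     for i in range(len(array)):
--         if i == a:
--             a, b = b, c
--             c = a + b
--             if isPrime(array[i]) == True:
--                 return False
--         else:
--             if isPrime(array[i]) == True: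
--                 primeNumber = True
--
--     if primeNumber:
--         return True
--     return False
-- ===== SOURCE B (Python) =====
-- def isPrime(x):
--     if x < 2:
--         return False
--     i = 2
--     while i * i <= x:
--         if x % i == 0:
--             return False
--         i += 1
--     return True
--
-- def f(array):
--     n = len(array)
--     if isPrime(array[0]):
--         return False
--     fibs = set()
--     a, b = 1, 2
--     while a < n:
--         fibs.add(a)
--         a, b = b, a + b
--     if any(isPrime(array[i]) for i in range(n) if i in fibs):
--         return False
--     return any(isPrime(array[i]) for i in range(n) if i not in fibs)
-- ===== Notes on version B (the rewrite author's own statement) =====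
-- stated objective: alternative
-- what changed: B precomputes the set of Fibonacci indices (1,2,3,5,8,...) below len(array) once and replaces A's single interleaved loop with rolling fib state by two flat scans: first over fib-indexed positions, then over the rest.
import Mathlib
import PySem

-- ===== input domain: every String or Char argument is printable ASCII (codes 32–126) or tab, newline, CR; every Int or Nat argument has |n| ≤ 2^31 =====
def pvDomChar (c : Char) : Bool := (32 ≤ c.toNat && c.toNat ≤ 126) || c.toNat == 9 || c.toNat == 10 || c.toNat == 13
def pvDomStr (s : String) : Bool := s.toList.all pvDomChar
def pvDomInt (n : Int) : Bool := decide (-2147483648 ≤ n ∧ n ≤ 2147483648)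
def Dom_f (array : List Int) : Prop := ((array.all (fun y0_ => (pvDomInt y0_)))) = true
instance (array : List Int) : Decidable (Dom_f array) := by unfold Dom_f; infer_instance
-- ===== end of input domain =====

-- B precomputes the Fibonacci index set once and replaces A's single interleaved
-- loop (with rolling fib state) by two flat scans; objective: alternative decomposition.

-- ===== PORT A =====
-- shared helper: both Source A and Source B contain this identical isPrime
-- the 'while i * i <= x' loop; fuel = x.toNat is a totality guard only (the loop
-- makes at most isqrt(x) ≤ x tests, so it always terminates via the else branch)
def isPrimeLoop (x : Int) : Int → Nat → Bool
  | _, 0 => true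
  | i, fuel + 1 =>
    if i * i ≤ x then
      if PySem.Int.mod x i == 0 then false else isPrimeLoop x (i + 1) fuel
    else true

def isPrime (x : Int) : Bool :=
  if x < 2 then false else isPrimeLoop x 2 x.toNat

-- the 'for i in range(len(array))' loop; fuel = n is a totality guard only
-- (each iteration advances i by 1, so n iterations reach i = n)
def fLoop (array : List Int) (n : Nat) : Nat → Nat → Int → Int → Int → Bool → Bool
  | 0, _, _, _, _, primeNumber => primeNumber
  | fuel + 1, i, a, b, c, primeNumber =>
    if i < n then
      if (i : Int) == a then
        let a' := b
        let b' := c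
        let c' := a' + b'
        if isPrime ((PySem.List.pyGet? array (i : Int)).getD 0) == true then false
        else fLoop array n fuel (i + 1) a' b' c' primeNumber
      else
        if isPrime ((PySem.List.pyGet? array (i : Int)).getD 0) == true then
          fLoop array n fuel (i + 1) a b c true
        else fLoop array n fuel (i + 1) a b c primeNumber
    else primeNumber

def f (array : List Int) : Bool :=
  if isPrime ((PySem.List.pyGet? array 0).getD 0) then false
  else fLoop array array.length array.length 0 1 2 3 false

-- ===== PORT B =====
-- the 'while a < n' set-building loop; fuel = n is a totality guard only
-- (a strictly increases from 1, so n steps always suffice to reach a ≥ n)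
def fibAux : Nat → Nat → Nat → Nat → List Nat
  | 0, _, _, _ => []
  | fuel + 1, n, a, b => if a < n then a :: fibAux fuel n b (a + b) else []

def f_alt (array : List Int) : Bool :=
  let n := array.length
  if isPrime ((PySem.List.pyGet? array 0).getD 0) then false
  else
    let fibs : PySem.Set Nat := PySem.Set.ofList (fibAux n n 1 2)
    if (List.range n).any (fun i =>
        PySem.Set.contains fibs i && isPrime ((PySem.List.pyGet? array (i : Int)).getD 0)) then
      false
    else
      (List.range n).any (fun i =>
        !PySem.Set.contains fibs i && isPrime ((PySem.List.pyGet? array (i : Int)).getD 0))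

-- ===== PRECONDITION & SPEC =====
-- Pre_ excludes only the empty list, on which Python A raises IndexError (array[0]).
def Pre_f (array : List Int) : Prop := array ≠ []
instance (array : List Int) : Decidable (Pre_f array) := by unfold Pre_f; infer_instance
def pvWitness_f : List Int := [4, 6, 5]

def Spec_f (array : List Int) (out : Bool) : Prop := out = f_alt array
instance (array : List Int) (out : Bool) : Decidable (Spec_f array out) := by unfold Spec_f; infer_instance

-- ===== CLAIM (what is proved, stated in full; the proofs are below) =====
def Claim_equal_f : Prop := ∀ (array : List Int), Dom_f array → Pre_f array → Spec_f array (f array)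

-- ===== LEMMAS AND PROOFS =====

-- proof-only abbreviation: "array[i] is prime"
def pPrime (array : List Int) (i : Nat) : Bool :=
  isPrime ((PySem.List.pyGet? array (i : Int)).getD 0)

-- "some fib-indexed element from index i on is prime", rolling fib state (a, b)
def hasFibP (p : Nat → Bool) (n : Nat) : Nat → Nat → Nat → Nat → Bool
  | 0, _, _, _ => false
  | fuel + 1, i, a, b =>
    if i < n then
      if i = a then (p i || hasFibP p n fuel (i + 1) b (a + b)) else hasFibP p n fuel (i + 1) a b
    else false

-- "some non-fib-indexed element from index i on is prime"
def hasNonP (p : Nat → Bool) (n : Nat) : Nat → Nat → Nat → Nat → Bool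
  | 0, _, _, _ => false
  | fuel + 1, i, a, b =>
    if i < n then
      if i = a then hasNonP p n fuel (i + 1) b (a + b) else (p i || hasNonP p n fuel (i + 1) a b)
    else false

theorem fLoop_char (array : List Int) (n : Nat) :
    ∀ (k i a b : Nat) (prime : Bool), n - i ≤ k → i ≤ a → 1 ≤ a → a < b →
    fLoop array n k i (a : Int) (b : Int) ((a : Int) + (b : Int)) prime =
      (if hasFibP (pPrime array) n k i a b then false
       else (prime || hasNonP (pPrime array) n k i a b)) := by
  intro k
  induction k with
  | zero =>
    intro i a b prime hk hia h1 hab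
    simp [fLoop, hasFibP, hasNonP]
  | succ k ih =>
    intro i a b prime hk hia h1 hab
    by_cases hn : i < n
    · rw [fLoop, hasFibP, hasNonP]
      rw [show isPrime ((PySem.List.pyGet? array (i : Int)).getD 0) = pPrime array i from rfl]
      by_cases hia' : i = a
      · subst hia'
        rw [if_pos hn, if_pos hn, if_pos hn,
          if_pos (beq_self_eq_true ((i : Nat) : Int)), if_pos rfl, if_pos rfl]
        cases hp : pPrime array i with
        | true => simp [hp]
        | false =>
          have h2 := ih (i + 1) b (i + b) prime (by omega) (by omega) (by omega) (by omega)
          simp only [hp, Bool.false_or]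
          rw [show ((i : Int) + (b : Int)) = (((i + b : Nat)) : Int) from by push_cast; ring]
          rw [h2]
          cases hF : hasFibP (pPrime array) n k (i + 1) b (i + b) <;> simp [hF]
      · have hbeq : (((i : Nat) : Int) == ((a : Nat) : Int)) = false := by
          rw [beq_eq_false_iff_ne]
          exact_mod_cast hia'
        rw [if_pos hn, if_pos hn, if_pos hn]
        cases hp : pPrime array i with
        | true =>
          have h2 := ih (i + 1) a b true (by omega) (by omega) h1 hab
          simp only [hbeq, hia', hp, if_false, ite_false, Bool.false_eq_true, if_true,
            Bool.true_eq_false, Bool.true_or, Bool.or_true, beq_self_eq_true]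
          rw [h2]
          cases hF : hasFibP (pPrime array) n k (i + 1) a b <;> simp [hF]
        | false =>
          have h2 := ih (i + 1) a b prime (by omega) (by omega) h1 hab
          simp only [hbeq, hia', hp, if_false, ite_false, Bool.false_eq_true, if_true,
            Bool.true_eq_false, Bool.false_or, beq_self_eq_true]
          exact h2
    · rw [fLoop, hasFibP, hasNonP]
      simp [hn]

theorem fibAux_stop (fuel n a b : Nat) (h : n ≤ a) : fibAux fuel n a b = [] := by
  cases fuel with
  | zero => rfl
  | succ m => simp [fibAux, show ¬ a < n from by omega]

theorem fibAux_fuel : ∀ (f1 f2 n a b : Nat), 1 ≤ a → a < b → n - a ≤ f1 → n - a ≤ f2 →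
    fibAux f1 n a b = fibAux f2 n a b := by
  intro f1
  induction f1 with
  | zero =>
    intro f2 n a b h1 hab hf1 hf2
    rw [fibAux_stop 0 n a b (by omega), fibAux_stop f2 n a b (by omega)]
  | succ m ih =>
    intro f2 n a b h1 hab hf1 hf2
    by_cases h : a < n
    · cases f2 with
      | zero => omega
      | succ m2 =>
        simp only [fibAux, if_pos h]
        rw [ih m2 n b (a + b) (by omega) (by omega) (by omega) (by omega)]
    · rw [fibAux_stop (m + 1) n a b (by omega), fibAux_stop f2 n a b (by omega)]

theorem fibAux_step (n a b : Nat) (h1 : 1 ≤ a) (hab : a < b) (han : a < n) :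
    fibAux n n a b = a :: fibAux n n b (a + b) := by
  obtain ⟨m, rfl⟩ : ∃ m, n = m + 1 := ⟨n - 1, by omega⟩
  have hunf : fibAux (m + 1) (m + 1) a b
      = if a < m + 1 then a :: fibAux m (m + 1) b (a + b) else [] := rfl
  rw [hunf, if_pos han,
    fibAux_fuel m (m + 1) (m + 1) b (a + b) (by omega) (by omega) (by omega) (by omega)]

theorem fibAux_ge : ∀ (fuel n a b j : Nat), 1 ≤ a → a < b → j ∈ fibAux fuel n a b → a ≤ j := by
  intro fuel
  induction fuel with
  | zero =>
    intro n a b j _ _ hj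
    simp [fibAux] at hj
  | succ m ih =>
    intro n a b j h1 hab hj
    by_cases h : a < n
    · simp only [fibAux, if_pos h, List.mem_cons] at hj
      rcases hj with rfl | hj
      · exact le_refl _
      · exact le_trans (by omega) (ih n b (a + b) j (by omega) (by omega) hj)
    · simp [fibAux, h] at hj

theorem contains_ofList_eq (L : List Nat) (j : Nat) :
    PySem.Set.contains (PySem.Set.ofList L) j = decide (j ∈ L) := by
  first
    | rw [PySem.Set.contains_eq_decide]
      simp [PySem.Set.mem_ofList]
    | simp [PySem.Set.contains_eq_decide, PySem.Set.mem_ofList]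
    | simp [PySem.Set.contains_eq_listContains, PySem.Set.mem_ofList]

theorem any_congr' {α : Type} (l : List α) (g f : α → Bool) (h : ∀ x ∈ l, f x = g x) :
    l.any f = l.any g := by
  induction l with
  | nil => rfl
  | cons x t ih =>
    simp only [List.any_cons]
    rw [h x (List.mem_cons_self ..), ih (fun y hy => h y (List.mem_cons_of_mem _ hy))]

theorem rangeFib (array : List Int) (n : Nat) :
    ∀ (k i a b : Nat), n - i ≤ k → i ≤ a → 1 ≤ a → a < b →
    (List.range' i (n - i)).any
        (fun j => PySem.Set.contains (PySem.Set.ofList (fibAux n n a b)) j && pPrime array j)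
      = hasFibP (pPrime array) n k i a b := by
  intro k
  induction k with
  | zero =>
    intro i a b hk hia h1 hab
    rw [show n - i = 0 from by omega]
    simp [hasFibP]
  | succ k ih =>
    intro i a b hk hia h1 hab
    by_cases hn : i < n
    · rw [show n - i = (n - (i + 1)) + 1 from by omega, List.range'_succ, hasFibP,
        if_pos hn, List.any_cons]
      by_cases hia' : i = a
      · subst hia'
        have hc : PySem.Set.contains (PySem.Set.ofList (fibAux n n i b)) i = true := by
          rw [contains_ofList_eq, fibAux_step n i b h1 hab hn]
          simp
        rw [hc, if_pos rfl]
        have hcong : ∀ j ∈ List.range' (i + 1) (n - (i + 1)),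
            (PySem.Set.contains (PySem.Set.ofList (fibAux n n i b)) j && pPrime array j)
            = (PySem.Set.contains (PySem.Set.ofList (fibAux n n b (i + b))) j && pPrime array j) := by
          intro j hj
          have hj' : i + 1 ≤ j := (List.mem_range'_1.mp hj).1
          rw [contains_ofList_eq, contains_ofList_eq, fibAux_step n i b h1 hab hn]
          simp [List.mem_cons, show j ≠ i from by omega]
        rw [any_congr' _ _ _ hcong, ih (i + 1) b (i + b) (by omega) (by omega) (by omega) (by omega)]
        simp
      · have hc : PySem.Set.contains (PySem.Set.ofList (fibAux n n a b)) i = false := by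
          rw [contains_ofList_eq, decide_eq_false_iff_not]
          intro hmem
          exact absurd (fibAux_ge n n a b i h1 hab hmem) (by omega)
        rw [hc, if_neg hia', ih (i + 1) a b (by omega) (by omega) h1 hab]
        simp
    · rw [show n - i = 0 from by omega]
      simp [hasFibP, hn]

theorem rangeNon (array : List Int) (n : Nat) :
    ∀ (k i a b : Nat), n - i ≤ k → i ≤ a → 1 ≤ a → a < b →
    (List.range' i (n - i)).any
        (fun j => !PySem.Set.contains (PySem.Set.ofList (fibAux n n a b)) j && pPrime array j)
      = hasNonP (pPrime array) n k i a b := by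
  intro k
  induction k with
  | zero =>
    intro i a b hk hia h1 hab
    rw [show n - i = 0 from by omega]
    simp [hasNonP]
  | succ k ih =>
    intro i a b hk hia h1 hab
    by_cases hn : i < n
    · rw [show n - i = (n - (i + 1)) + 1 from by omega, List.range'_succ, hasNonP,
        if_pos hn, List.any_cons]
      by_cases hia' : i = a
      · subst hia'
        have hc : PySem.Set.contains (PySem.Set.ofList (fibAux n n i b)) i = true := by
          rw [contains_ofList_eq, fibAux_step n i b h1 hab hn]
          simp
        rw [hc, if_pos rfl]
        have hcong : ∀ j ∈ List.range' (i + 1) (n - (i + 1)),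
            (!PySem.Set.contains (PySem.Set.ofList (fibAux n n i b)) j && pPrime array j)
            = (!PySem.Set.contains (PySem.Set.ofList (fibAux n n b (i + b))) j && pPrime array j) := by
          intro j hj
          have hj' : i + 1 ≤ j := (List.mem_range'_1.mp hj).1
          rw [contains_ofList_eq, contains_ofList_eq, fibAux_step n i b h1 hab hn]
          simp [List.mem_cons, show j ≠ i from by omega]
        rw [any_congr' _ _ _ hcong, ih (i + 1) b (i + b) (by omega) (by omega) (by omega) (by omega)]
        simp
      · have hc : PySem.Set.contains (PySem.Set.ofList (fibAux n n a b)) i = false := by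
          rw [contains_ofList_eq, decide_eq_false_iff_not]
          intro hmem
          exact absurd (fibAux_ge n n a b i h1 hab hmem) (by omega)
        rw [hc, if_neg hia', ih (i + 1) a b (by omega) (by omega) h1 hab]
        simp
    · rw [show n - i = 0 from by omega]
      simp [hasNonP, hn]

-- ===== VERDICT (by name: the statement is the Claim_ definition above) =====
theorem f_spec : Claim_equal_f := by
  intro array _ _
  unfold Spec_f f f_alt
  by_cases hp0 : isPrime ((PySem.List.pyGet? array 0).getD 0) = true
  · simp only [hp0, if_true]
  · simp only [hp0, if_false, ite_false, Bool.false_eq_true]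
    have hA := fLoop_char array array.length array.length 0 1 2 false
      (by omega) (by omega) (by omega) (by omega)
    norm_num at hA
    have hF := rangeFib array array.length array.length 0 1 2
      (by omega) (by omega) (by omega) (by omega)
    have hN := rangeNon array array.length array.length 0 1 2
      (by omega) (by omega) (by omega) (by omega)
    simp only [Nat.sub_zero, pPrime] at hF hN
    rw [hA, List.range_eq_range', hF, hN]
    cases hFv : hasFibP (pPrime array) array.length array.length 0 1 2 <;> simp [hFv]
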